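-- pv_equiv track=rewrite | github.com/LeaderMaharshi/Competitive-coding-with-python | Strings/high_frequencey_char_in_string.py | highest_frequency
-- ===== SOURCE A (Python) =====
-- def highest_frequency(string):
--     char_string = {}
--     for char in string:
--         if char in char_string:
--             char_string[char] += 1
--         else:
--             char_string[char] = 1
--     max_count = max(char_string.values())
--     return [char for char, count in char_string.items() if count == max_count]
-- ===== SOURCE B (Python) =====
-- def highest_frequency(string):
--     counts = {}
--     for char in string:
--         counts[char] = counts.get(char, 0) + 1
--     buckets = {}
--     for char, count in counts.items():
--         buckets.setdefault(count, []).append(char)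
--     return buckets[max(buckets)]
-- ===== Notes on version B (the rewrite author's own statement) =====
-- stated objective: alternative
-- what changed: B groups characters into a dict of frequency-count buckets and returns the bucket of the maximal count, instead of A's filter of the count dict's items against max(values); both still raise ValueError on the empty string.
import Mathlib
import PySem

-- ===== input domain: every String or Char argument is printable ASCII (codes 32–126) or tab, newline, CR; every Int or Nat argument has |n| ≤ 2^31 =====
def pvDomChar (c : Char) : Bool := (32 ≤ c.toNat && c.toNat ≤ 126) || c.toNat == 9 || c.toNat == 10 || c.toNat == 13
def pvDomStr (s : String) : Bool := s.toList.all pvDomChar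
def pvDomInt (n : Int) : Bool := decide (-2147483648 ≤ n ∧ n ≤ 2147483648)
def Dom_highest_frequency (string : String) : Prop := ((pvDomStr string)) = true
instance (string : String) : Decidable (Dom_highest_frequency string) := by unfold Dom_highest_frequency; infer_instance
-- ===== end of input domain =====

-- B replaces A's filter-by-max pass over the count dict with a frequency→characters bucket dict
-- and returns the bucket of the maximal frequency (objective: alternative decomposition, same cost).

-- ===== PORT A =====
-- literal port of A: count chars with an if-contains/else dict loop, take max of values, filter items
def highest_frequency (string : String) : List String :=
  let char_string : PySem.Dict Char Int :=
    string.toList.foldl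
      (fun d c => if d.contains c then d.modify c 0 (· + 1) else d.insert c 1)
      PySem.Dict.empty
  match PySem.List.max? char_string.values (fun x => x) with
  | none => []  -- unreachable under Pre_: Python raises ValueError on the empty string
  | some max_count =>
      (char_string.items.filter (fun p => p.2 == max_count)).map (fun p => String.ofList [p.1])

-- ===== PORT B =====
-- literal port of Source B: counts via get-or-0 insert, buckets via setdefault-append, look up max key
def highest_frequency_alt (string : String) : List String :=
  let counts : PySem.Dict Char Int :=
    string.toList.foldl (fun d c => d.insert c (d.getD c 0 + 1)) PySem.Dict.empty
  let buckets : PySem.Dict Int (List String) :=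
    counts.items.foldl
      (fun b p => b.modify p.2 [] (· ++ [String.ofList [p.1]]))
      PySem.Dict.empty
  match PySem.List.max? buckets.keys (fun x => x) with
  | none => []  -- unreachable under Pre_: Python raises ValueError on the empty string
  | some m => buckets.getD m []

-- ===== PRECONDITION & SPEC =====
-- Pre_ excludes only the empty string, on which both Pythons raise ValueError (max() of an empty sequence).
def Pre_highest_frequency (string : String) : Prop := string ≠ ""
instance (string : String) : Decidable (Pre_highest_frequency string) := by unfold Pre_highest_frequency; infer_instance
def pvWitness_highest_frequency : String := "aab"
def Spec_highest_frequency (string : String) (out : List String) : Prop := out = highest_frequency_alt string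
instance (string : String) (out : List String) : Decidable (Spec_highest_frequency string out) := by unfold Spec_highest_frequency; infer_instance

-- ===== CLAIM (what is proved, stated in full; the proofs are below) =====
def Claim_equal_highest_frequency : Prop := ∀ (string : String), Dom_highest_frequency string → Pre_highest_frequency string → Spec_highest_frequency string (highest_frequency string)

-- ===== LEMMAS AND PROOFS =====

-- A's if-contains/else counting step is exactly the Counter step (on an absent key,
-- modify with default 0 inserts 0+1 = 1)
lemma hf_step_eq (d : PySem.Dict Char Int) (c : Char) :
    (if d.contains c then d.modify c 0 (· + 1) else d.insert c 1) = d.modify c 0 (· + 1) := by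
  by_cases h : d.contains c
  · simp [h]
  · simp only [Bool.not_eq_true] at h
    simp [h, PySem.Dict.modify, PySem.Dict.getD_of_not_contains _ _ h]

-- hence A's whole counting loop builds `PySem.Dict.counter`
lemma hf_foldA_eq_counter (cs : List Char) :
    cs.foldl (fun d c => if d.contains c then d.modify c 0 (· + 1) else d.insert c 1)
      PySem.Dict.empty = PySem.Dict.counter cs := by
  rw [PySem.Dict.counter_eq_foldl]
  congr 1
  funext d c
  exact hf_step_eq d c

-- max? with the identity key depends only on membership
lemma hf_max?_id_congr (l l' : List Int) (h : ∀ x, x ∈ l ↔ x ∈ l') :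
    PySem.List.max? l (fun x => x) = PySem.List.max? l' (fun x => x) := by
  rcases hl : PySem.List.max? l (fun x => x) with _ | m
  · rw [PySem.List.max?_eq_none_iff] at hl
    subst hl
    rcases hl' : PySem.List.max? l' (fun x => x) with _ | m'
    · rfl
    · have := PySem.List.max?_mem hl'
      rw [← h] at this; simp at this
  · rcases hl' : PySem.List.max? l' (fun x => x) with _ | m'
    · rw [PySem.List.max?_eq_none_iff] at hl'
      subst hl'
      have := PySem.List.max?_mem hl
      rw [h] at this; simp at this
    · have hm := PySem.List.max?_mem hl
      have hm' := PySem.List.max?_mem hl'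
      have h1 := PySem.List.max?_isMax hl m' ((h m').mpr hm')
      have h2 := PySem.List.max?_isMax hl' m ((h m).mp hm)
      simp at h1 h2 ⊢
      omega

-- B's bucket loop, seen as a fold over the (count, char-string) pairs
lemma hf_buckets_as_map (l : List (Char × Int)) :
    l.foldl (fun (b : PySem.Dict Int (List String)) p => b.modify p.2 [] (· ++ [String.ofList [p.1]]))
        PySem.Dict.empty
      = (l.map (fun p => (p.2, String.ofList [p.1]))).foldl
          (fun d p => d.modify p.1 [] (· ++ [p.2])) PySem.Dict.empty := by
  rw [List.foldl_map]

-- the bucket dict's keys are exactly the distinct counts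
lemma hf_buckets_keys (l : List (Int × String)) :
    ((l.foldl (fun d p => d.modify p.1 [] (· ++ [p.2])) PySem.Dict.empty).keys)
      = PySem.Set.ofList (l.map (·.1)) := by
  rw [show (fun (d : PySem.Dict Int (List String)) (p : Int × String) => d.modify p.1 [] (· ++ [p.2]))
        = (fun d p => d.modify ((·.1 : Int × String → Int) p) []
            ((fun (_ : PySem.Dict Int (List String)) (p : Int × String) => (· ++ [p.2])) d p)) from rfl]
  rw [PySem.Dict.keys_foldl_modify_key]
  simp [PySem.Dict.keys_empty]
  rfl

-- a bucket holds, in order, the second components of the pairs keyed by it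
lemma hf_buckets_getD (l : List (Int × String)) (m : Int) :
    (l.foldl (fun d p => d.modify p.1 [] (· ++ [p.2])) PySem.Dict.empty).getD m []
      = (l.filter (fun p => p.1 == m)).map (·.2) := by
  rw [PySem.Dict.getD_foldl_modify_append]
  simp [PySem.Dict.getD_empty]

-- ===== VERDICT (by name: the statement is the Claim_ definition above) =====
theorem highest_frequency_spec : Claim_equal_highest_frequency := by
  intro string _ _
  unfold Spec_highest_frequency highest_frequency highest_frequency_alt
  simp only []
  rw [hf_foldA_eq_counter, PySem.Dict.foldl_insert_getD_add_one_eq_counter]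
  set cnt := PySem.Dict.counter string.toList with hcnt
  rw [hf_buckets_as_map]
  set l' := cnt.items.map (fun p => (p.2, String.ofList [p.1])) with hl'
  have hkeys : ((l'.foldl (fun d p => d.modify p.1 [] (· ++ [p.2])) PySem.Dict.empty).keys)
      = PySem.Set.ofList (l'.map (·.1)) := hf_buckets_keys l'
  have hmem : ∀ x : Int, x ∈ cnt.values ↔ x ∈ PySem.Set.ofList (l'.map (·.1)) := by
    intro x
    rw [PySem.Set.mem_ofList]
    simp [hl', PySem.Dict.values, List.map_map, Function.comp]
  have hmax : PySem.List.max? cnt.values (fun x => x)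
      = PySem.List.max? ((l'.foldl (fun d p => d.modify p.1 [] (· ++ [p.2])) PySem.Dict.empty).keys) (fun x => x) := by
    rw [hkeys]
    exact hf_max?_id_congr _ _ hmem
  rw [← hmax]
  rcases hm : PySem.List.max? cnt.values (fun x => x) with _ | m
  · rfl
  · simp only []
    rw [hf_buckets_getD l' m, hl', List.filter_map]
    simp [Function.comp_def]
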